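-- pv_equiv track=rewrite | github.com/nadaelarabyy/financial-reporter | app/reconstruction/cell_merger.py | merge_wrapped_first_column_rows
-- ===== SOURCE A (Python) =====
-- from typing import List
--
-- def merge_wrapped_first_column_rows(matrix: List[List[str]]) -> List[List[str]]:
--     """
--     Heuristic:
--     If a row has only first column filled and next row has numeric/data columns,
--     merge the first-column label into the next row.
--
--     Example:
--       ["Trade receivables", "", "", ""]
--       ["", "100", "90", "80"]
--     =>
--       ["Trade receivables", "100", "90", "80"]
--     """
--     if not matrix:
--         return matrix
--
--     merged = []
--     i = 0
--
--     while i < len(matrix):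
--         current = matrix[i]
--
--         if i < len(matrix) - 1:
--             nxt = matrix[i + 1]
--
--             current_non_empty = [idx for idx, c in enumerate(current) if c.strip()]
--             next_non_empty = [idx for idx, c in enumerate(nxt) if c.strip()]
--
--             # wrapped label row: only col 0 filled
--             if current_non_empty == [0]:
--                 # next row has data beyond first col
--                 if any(idx > 0 for idx in next_non_empty):
--                     merged_row = list(nxt)
--                     if merged_row[0].strip():
--                         merged_row[0] = current[0].strip() + " " + merged_row[0].strip()
--                     else:
--                         merged_row[0] = current[0].strip()
--
--                     merged.append(merged_row)
--                     i += 2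
--                     continue
--
--         merged.append(current)
--         i += 1
--
--     return merged
-- ===== SOURCE B (Python) =====
-- from typing import List
--
-- def _blank(c: str) -> bool:
--     return not c.strip()
--
-- def _is_label_row(row: List[str]) -> bool:
--     return bool(row) and bool(row[0].strip()) and all(_blank(c) for c in row[1:])
--
-- def merge_wrapped_first_column_rows(matrix: List[List[str]]) -> List[List[str]]:
--     result = []
--     pending = None
--     for row in matrix:
--         if pending is not None:
--             if any(c.strip() for c in row[1:]):
--                 merged_row = list(row)
--                 head = merged_row[0].strip()
--                 label = pending[0].strip()
--                 merged_row[0] = label + " " + head if head else label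
--                 result.append(merged_row)
--                 pending = None
--                 continue
--             result.append(pending)
--             pending = None
--         if _is_label_row(row):
--             pending = row
--         else:
--             result.append(row)
--     if pending is not None:
--         result.append(pending)
--     return result
-- ===== Notes on version B (the rewrite author's own statement) =====
-- stated objective: simpler
-- what changed: Replaced A's index-based while loop with lookahead matrix[i+1] and skip-by-2 (i += 2) by a single forward pass carrying a pending-label buffer: a label-only row is held back and either merged into the next data row or flushed unchanged, with a final flush after the loop; B stops at the first filled cell instead of building full non-empty-index lists for both current and next row at every position.
import Mathlib
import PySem

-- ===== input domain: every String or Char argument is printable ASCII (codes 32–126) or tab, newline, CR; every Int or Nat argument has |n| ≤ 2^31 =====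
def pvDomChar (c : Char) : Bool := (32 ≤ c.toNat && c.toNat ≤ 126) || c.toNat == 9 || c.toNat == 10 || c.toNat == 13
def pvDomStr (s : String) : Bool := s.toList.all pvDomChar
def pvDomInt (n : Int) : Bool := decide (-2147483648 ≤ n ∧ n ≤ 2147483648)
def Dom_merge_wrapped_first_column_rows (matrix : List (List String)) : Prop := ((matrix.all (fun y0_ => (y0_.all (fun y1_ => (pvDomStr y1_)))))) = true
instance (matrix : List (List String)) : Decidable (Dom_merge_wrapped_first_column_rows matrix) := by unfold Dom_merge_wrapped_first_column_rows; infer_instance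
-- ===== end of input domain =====

-- B rewrites A's index/lookahead/skip-by-2 while loop as a single forward pass carrying a
-- pending-label buffer (objective: simpler decomposition; same asymptotic cost).

-- shared cell predicate: Python's truthiness of c.strip()
def pvCellFilled (c : String) : Bool := PySem.Str.strip c != ""

-- ===== PORT A =====
-- '[idx for idx, c in enumerate(row) if c.strip()]'
def pvNonEmptyIdx (row : List String) : List Int :=
  ((PySem.List.enumerate row).filter (fun ic => pvCellFilled ic.2)).map Prod.fst

-- the while loop over matrix with i += 1 / i += 2, as structural recursion on the suffix;
-- nxt[0]/current[0] are read with headD "" — exact, since both rows are non-empty on that branch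
def pvMergeLoopA : List (List String) → List (List String)
  | [] => []
  | [current] => [current]
  | current :: nxt :: rest =>
    if pvNonEmptyIdx current = [0] then
      if (pvNonEmptyIdx nxt).any (fun idx => decide (0 < idx)) then
        (let h := PySem.Str.strip (nxt.headD "")
         let lbl := PySem.Str.strip (current.headD "")
         (if h ≠ "" then lbl ++ " " ++ h else lbl) :: nxt.tail) :: pvMergeLoopA rest
      else current :: pvMergeLoopA (nxt :: rest)
    else current :: pvMergeLoopA (nxt :: rest)

def merge_wrapped_first_column_rows (matrix : List (List String)) : List (List String) :=
  if matrix = [] then matrix else pvMergeLoopA matrix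

-- ===== PORT B =====
def pvIsLabelRow (row : List String) : Bool :=
  !row.isEmpty && pvCellFilled (row.headD "") && row.tail.all (fun c => !pvCellFilled c)

-- forward pass with a pending-label buffer; flushes the buffer at the end of the list
def pvMergeLoopB : Option (List String) → List (List String) → List (List String)
  | none, [] => []
  | some p, [] => [p]
  | some p, row :: rest =>
    if row.tail.any pvCellFilled then
      (let head := PySem.Str.strip (row.headD "")
       let lbl := PySem.Str.strip (p.headD "")
       (if head ≠ "" then lbl ++ " " ++ head else lbl) :: row.tail) :: pvMergeLoopB none rest
    else
      p :: (if pvIsLabelRow row then pvMergeLoopB (some row) rest else row :: pvMergeLoopB none rest)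
  | none, row :: rest =>
    if pvIsLabelRow row then pvMergeLoopB (some row) rest else row :: pvMergeLoopB none rest

def merge_wrapped_first_column_rows_alt (matrix : List (List String)) : List (List String) :=
  pvMergeLoopB none matrix

-- ===== PRECONDITION & SPEC =====
def Spec_merge_wrapped_first_column_rows (matrix : List (List String)) (out : List (List String)) : Prop := out = merge_wrapped_first_column_rows_alt matrix
instance (matrix : List (List String)) (out : List (List String)) : Decidable (Spec_merge_wrapped_first_column_rows matrix out) := by unfold Spec_merge_wrapped_first_column_rows; infer_instance

-- ===== CLAIM (what is proved, stated in full; the proofs are below) =====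
def Claim_equal_merge_wrapped_first_column_rows : Prop := ∀ (matrix : List (List String)), Dom_merge_wrapped_first_column_rows matrix → Spec_merge_wrapped_first_column_rows matrix (merge_wrapped_first_column_rows matrix)

-- ===== LEMMAS AND PROOFS =====

-- the filtered index list of a tail-piece of enumerate, starting at index s
lemma pvNonEmptyIdx_cons (c : String) (t : List String) :
    pvNonEmptyIdx (c :: t) =
      (if pvCellFilled c then [(0 : Int)] else []) ++
        ((PySem.List.enumerate t 1).filter (fun ic => pvCellFilled ic.2)).map Prod.fst := by
  simp [pvNonEmptyIdx, PySem.List.enumerate_cons]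
  by_cases h : pvCellFilled c <;> simp [h]

lemma pvFilterIdx_nil_iff (t : List String) (s : Int) :
    (((PySem.List.enumerate t s).filter (fun ic => pvCellFilled ic.2)).map Prod.fst = []) ↔
      t.all (fun c => !pvCellFilled c) = true := by
  induction t generalizing s with
  | nil => simp [PySem.List.enumerate_nil]
  | cons c t ih =>
    by_cases h : pvCellFilled c <;>
      simp [PySem.List.enumerate_cons, h, ih (s + 1)]

lemma pvFilterIdx_any_pos (t : List String) (s : Int) (hs : 1 ≤ s) :
    ((((PySem.List.enumerate t s).filter (fun ic => pvCellFilled ic.2)).map Prod.fst).any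
        (fun idx => decide (0 < idx))) = t.any pvCellFilled := by
  induction t generalizing s with
  | nil => simp [PySem.List.enumerate_nil]
  | cons c t ih =>
    by_cases h : pvCellFilled c <;>
      simp [PySem.List.enumerate_cons, h, ih (s + 1) (by omega), show (0 : Int) < s by omega]

lemma pvFilterIdx_mem_ge (t : List String) (s x : Int)
    (hx : x ∈ ((PySem.List.enumerate t s).filter (fun ic => pvCellFilled ic.2)).map Prod.fst) :
    s ≤ x := by
  simp only [List.mem_map, List.mem_filter] at hx
  obtain ⟨p, ⟨hmem, _⟩, rfl⟩ := hx
  obtain ⟨k, hk, hpq⟩ := (PySem.List.mem_enumerate_iff t s p).mp hmem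
  rw [hpq]
  simp

-- A's label test (index list equals [0]) is B's pvIsLabelRow
lemma label_iff (row : List String) :
    (pvNonEmptyIdx row = [0]) ↔ pvIsLabelRow row = true := by
  cases row with
  | nil => simp [pvNonEmptyIdx, PySem.List.enumerate_nil, pvIsLabelRow]
  | cons c t =>
    by_cases h : pvCellFilled c
    · rw [pvNonEmptyIdx_cons]
      simp [h, pvIsLabelRow, pvFilterIdx_nil_iff t 1]
    · have hfalse : pvIsLabelRow (c :: t) = false := by
        simp [pvIsLabelRow, h]
      rw [pvNonEmptyIdx_cons, if_neg h, hfalse, List.nil_append]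
      simp only [Bool.false_eq_true, iff_false]
      intro he
      have h0 := pvFilterIdx_mem_ge t 1 0 (by rw [he]; simp)
      omega

-- A's "any idx > 0" test is B's test on the row tail
lemma anypos_eq (row : List String) :
    ((pvNonEmptyIdx row).any (fun idx => decide (0 < idx))) = row.tail.any pvCellFilled := by
  cases row with
  | nil => simp [pvNonEmptyIdx, PySem.List.enumerate_nil]
  | cons c t =>
    rw [pvNonEmptyIdx_cons]
    by_cases h : pvCellFilled c <;>
      simp [h, pvFilterIdx_any_pos t 1 le_rfl]

lemma loopA_not_label (row : List String) (rest : List (List String))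
    (h : ¬ pvIsLabelRow row = true) :
    pvMergeLoopA (row :: rest) = row :: pvMergeLoopA rest := by
  cases rest with
  | nil => simp [pvMergeLoopA]
  | cons nxt r2 =>
    rw [pvMergeLoopA]
    rw [if_neg (fun hc => h ((label_iff row).mp hc))]

lemma loops_agree (l : List (List String)) :
    pvMergeLoopB none l = pvMergeLoopA l ∧
      ∀ p, pvIsLabelRow p = true → pvMergeLoopB (some p) l = pvMergeLoopA (p :: l) := by
  induction l with
  | nil => simp [pvMergeLoopB, pvMergeLoopA]
  | cons row rest ih =>
    have h1 : pvMergeLoopB none (row :: rest) = pvMergeLoopA (row :: rest) := by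
      rw [pvMergeLoopB]
      by_cases hl : pvIsLabelRow row = true
      · rw [if_pos hl, ih.2 row hl]
      · rw [if_neg hl, ih.1, loopA_not_label row rest hl]
    refine ⟨h1, fun p hp => ?_⟩
    rw [pvMergeLoopB, pvMergeLoopA, if_pos ((label_iff p).mpr hp)]
    by_cases hd : row.tail.any pvCellFilled = true
    · rw [if_pos hd, anypos_eq row, if_pos hd, ih.1]
    · have hB : (if pvIsLabelRow row then pvMergeLoopB (some row) rest
              else row :: pvMergeLoopB none rest) = pvMergeLoopB none (row :: rest) := by
        rw [pvMergeLoopB]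
      rw [if_neg hd, anypos_eq row, if_neg hd, hB, h1]

-- ===== VERDICT (by name: the statement is the Claim_ definition above) =====
theorem merge_wrapped_first_column_rows_spec : Claim_equal_merge_wrapped_first_column_rows := by
  intro matrix _
  unfold Spec_merge_wrapped_first_column_rows merge_wrapped_first_column_rows
    merge_wrapped_first_column_rows_alt
  by_cases h : matrix = []
  · subst h; simp [pvMergeLoopB]
  · rw [if_neg h, (loops_agree matrix).1]
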